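-- pv_equiv track=rewrite | github.com/HYEZ/Algorithms | 프로그래머스/점프와순간이동.py | solution_dp
-- ===== SOURCE A (Python) =====
-- def solution_dp(n):
--     dp = [0 for _ in range(n+1)]
--     dp[1] = 1
--     for i in range(2, n+1):
--         dp[i] = dp[i-1] + 1
--         if i % 2 == 0:
--             dp[i] = min(dp[i], dp[i//2])
--
--     return dp[n]
-- ===== SOURCE B (Python) =====
-- def solution_dp(n):
--     bits = 0
--     while n > 0:
--         bits += n & 1
--         n >>= 1
--     return bits
-- ===== Notes on version B (the rewrite author's own statement) =====
-- stated objective: faster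
-- what changed: Replaced the O(n) DP table (dp[i] from dp[i-1]+1 and dp[i//2]) by a direct popcount loop over n's binary digits, since the minimal number of +1 ops with free doubling equals the number of set bits.
-- outside the precondition, e.g. on solution_dp(0): A raises IndexError, B returns 0
-- crash fix: On every n <= 0 A raises IndexError (dp[1] on a list of length <= 1); B returns 0, the natural answer for nothing to reach. — e.g. on solution_dp(0): A raises IndexError, B returns 0
import Mathlib
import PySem

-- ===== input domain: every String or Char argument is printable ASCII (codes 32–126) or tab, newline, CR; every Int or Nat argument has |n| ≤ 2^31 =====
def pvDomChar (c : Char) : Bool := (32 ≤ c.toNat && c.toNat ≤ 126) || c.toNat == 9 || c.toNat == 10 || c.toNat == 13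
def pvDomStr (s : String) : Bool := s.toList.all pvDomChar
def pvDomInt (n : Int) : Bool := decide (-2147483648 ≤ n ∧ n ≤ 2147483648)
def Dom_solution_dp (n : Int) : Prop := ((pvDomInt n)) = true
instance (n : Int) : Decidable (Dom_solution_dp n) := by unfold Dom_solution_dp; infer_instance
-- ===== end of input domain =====

-- B replaces the O(n) DP table with an O(log n) popcount loop (min +1-ops with free doubling = number of set bits of n).

-- ===== PORT A =====
-- loop body of A's for-loop: dp[i] = dp[i-1] + 1; if i % 2 == 0: dp[i] = min(dp[i], dp[i//2])
def pvStepA (dp : List Int) (i : Int) : List Int :=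
  let dp := dp.set i.toNat (dp.getD (i-1).toNat 0 + 1)
  if PySem.Int.mod i 2 == 0 then
    dp.set i.toNat (min (dp.getD i.toNat 0) (dp.getD (PySem.Int.floordiv i 2).toNat 0))
  else dp

def solution_dp (n : Int) : Int :=
  let dp : List Int := (PySem.List.pyRange 0 (n+1) 1).map (fun _ => 0)  -- [0 for _ in range(n+1)]
  let dp := dp.set 1 1                                                   -- dp[1] = 1 (in range under Pre_)
  let dp := (PySem.List.pyRange 2 (n+1) 1).foldl pvStepA dp
  dp.getD n.toNat 0                                                      -- dp[n]

-- ===== PORT B =====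
-- while n > 0: bits += n & 1; n >>= 1   (recursion on the Nat value of n)
def pvLoopB : Nat → Int → Int
  | 0, bits => bits
  | m+1, bits => pvLoopB ((m+1)/2) (bits + ((m+1) % 2 : Nat))
decreasing_by exact Nat.div_lt_self (Nat.succ_pos m) one_lt_two

def solution_dp_alt (n : Int) : Int := pvLoopB n.toNat 0

-- ===== PRECONDITION & SPEC =====
-- A raises IndexError (dp[1] on a too-short list) for every n ≤ 0; those inputs are excluded.
def Pre_solution_dp (n : Int) : Prop := 1 ≤ n
instance (n : Int) : Decidable (Pre_solution_dp n) := by unfold Pre_solution_dp; infer_instance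
def pvWitness_solution_dp : Int := 6

-- On every n ≤ 0 A raises IndexError; B returns 0 (zero set bits, nothing to do).
def Raises_solution_dp (n : Int) : Prop := n ≤ 0
instance (n : Int) : Decidable (Raises_solution_dp n) := by unfold Raises_solution_dp; infer_instance
def pvRaiseWitness_solution_dp : Int := 0
def pvRaiseWitnessOut_solution_dp : Int := 0

def Spec_solution_dp (n : Int) (out : Int) : Prop := out = solution_dp_alt n
instance (n : Int) (out : Int) : Decidable (Spec_solution_dp n out) := by unfold Spec_solution_dp; infer_instance

-- ===== CLAIM (what is proved, stated in full; the proofs are below) =====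
def Claim_equal_solution_dp : Prop := ∀ (n : Int), Dom_solution_dp n → Pre_solution_dp n → Spec_solution_dp n (solution_dp n)
def Claim_raises_solution_dp : Prop := (∀ (n : Int), Dom_solution_dp n → Raises_solution_dp n → ¬ Pre_solution_dp n) ∧ (Dom_solution_dp (pvRaiseWitness_solution_dp) ∧ Raises_solution_dp (pvRaiseWitness_solution_dp) ∧ solution_dp_alt (pvRaiseWitness_solution_dp) = pvRaiseWitnessOut_solution_dp)

-- ===== LEMMAS AND PROOFS =====

-- popcount, as computed by B's loop with accumulator 0
def pvPop (k : Nat) : Int := pvLoopB k 0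

theorem pvLoopB_acc (k : Nat) : ∀ b : Int, pvLoopB k b = pvLoopB k 0 + b := by
  induction k using Nat.strong_induction_on with
  | _ k ih =>
    cases k with
    | zero => intro b; simp [pvLoopB]
    | succ m =>
      intro b
      have h := ih ((m+1)/2) (Nat.div_lt_self (Nat.succ_pos m) one_lt_two)
      rw [pvLoopB, pvLoopB, h (b + ((m+1) % 2 : Nat)), h (0 + ((m+1) % 2 : Nat))]
      ring

theorem pvPop_rec (m : Nat) (hm : 1 ≤ m) : pvPop m = pvPop (m/2) + (m % 2 : Nat) := by
  obtain ⟨j, rfl⟩ : ∃ j, m = j + 1 := ⟨m - 1, by omega⟩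
  show pvLoopB (j+1) 0 = _
  rw [pvLoopB, pvLoopB_acc]
  simp [pvPop]

theorem pvPop_zero : pvPop 0 = 0 := by simp [pvPop, pvLoopB]

theorem pvPop_succ_le (j : Nat) : pvPop (j+1) ≤ pvPop j + 1 := by
  induction j using Nat.strong_induction_on with
  | _ j ih =>
    rcases Nat.even_or_odd j with ⟨t, ht⟩ | ⟨t, ht⟩
    · -- j = 2t : pop(2t+1) = pop t + 1, pop(2t) = pop t (+ t=0 case)
      subst ht
      rw [pvPop_rec (t+t+1) (by omega)]
      have h2 : (t+t+1)/2 = t := by omega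
      have h3 : (t+t+1)%2 = 1 := by omega
      rw [h2, h3]
      cases t with
      | zero => simp [pvPop_zero]
      | succ s =>
        rw [pvPop_rec (s+1+(s+1)) (by omega)]
        have h4 : (s+1+(s+1))/2 = s+1 := by omega
        have h5 : (s+1+(s+1))%2 = 0 := by omega
        rw [h4, h5]; simp
    · -- j = 2t+1 : pop(j+1) = pop(t+1) ≤ pop t + 1 = pop j
      subst ht
      have e1 : 2*t+1+1 = (t+1) + (t+1) := by ring
      rw [e1, pvPop_rec ((t+1)+(t+1)) (by omega)]
      have h2 : ((t+1)+(t+1))/2 = t+1 := by omega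
      have h3 : ((t+1)+(t+1))%2 = 0 := by omega
      rw [h2, h3]
      have h4 := ih t (by omega)
      have e2 : 2*t+1 = t+t+1 := by ring
      rw [e2, pvPop_rec (t+t+1) (by omega)]
      have h5 : (t+t+1)/2 = t := by omega
      have h6 : (t+t+1)%2 = 1 := by omega
      rw [h5, h6]
      push_cast
      omega

-- getD of set, with default 0
theorem pvGetD_set (xs : List Int) (i k : Nat) (v : Int) :
    (xs.set i v).getD k 0 = if k = i ∧ i < xs.length then v else xs.getD k 0 := by
  rcases Nat.lt_or_ge k xs.length with hk | hk
  · by_cases h : k = i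
    · subst h
      by_cases hi : k < xs.length
      · simp [List.getD_eq_getElem?_getD, hi]
      · simp [hi] at hk
    · simp [List.getD_eq_getElem?_getD, List.getElem?_set_ne (fun hh => h hh.symm), h]
  · have hn : ¬(k = i ∧ i < xs.length) := by omega
    rw [if_neg hn]
    simp only [List.getD_eq_getElem?_getD]
    rw [List.getElem?_eq_none (by simpa using hk), List.getElem?_eq_none hk]

theorem pvBase_eq (N : Nat) :
    (PySem.List.pyRange 0 ((N:Int)+1) 1).map (fun _ => (0:Int)) = List.replicate (N+1) 0 := by
  rw [List.eq_replicate_iff]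
  constructor
  · simp [PySem.List.length_pyRange_one]
  · intro b hb
    simp at hb
    exact hb

-- getD of replicate 0 is 0 at every index
theorem pvGetD_replicate (n k : Nat) : (List.replicate n (0:Int)).getD k 0 = 0 := by
  simp only [List.getD_eq_getElem?_getD, List.getElem?_replicate]
  split <;> rfl

-- the loop invariant: after processing range(2, m+1), dp[k] = popcount k for 1 <= k <= m, 0 beyond
theorem pvLoopA_inv (N : Nat) (m : Nat) (h1 : 1 ≤ m) (h2 : m ≤ N) :
    ((PySem.List.pyRange 2 ((m:Int)+1) 1).foldl pvStepA ((List.replicate (N+1) (0:Int)).set 1 1)).length = N+1 ∧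
    ∀ k : Nat, k ≤ N →
      ((PySem.List.pyRange 2 ((m:Int)+1) 1).foldl pvStepA ((List.replicate (N+1) (0:Int)).set 1 1)).getD k 0
        = if 1 ≤ k ∧ k ≤ m then pvPop k else 0 := by
  induction m with
  | zero => omega
  | succ m ih =>
    rcases Nat.lt_or_ge m 1 with hm | hm
    · -- m = 0 : range(2, 2) is empty, state is the initial dp
      have hm0 : m = 0 := by omega
      subst hm0
      have hr : PySem.List.pyRange 2 (((0:Nat):Int)+1+1) 1 = [] :=
        PySem.List.pyRange_one_eq_nil (by norm_num)
      push_cast at hr ⊢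
      rw [hr]
      simp only [List.foldl_nil]
      refine ⟨by simp, fun k hk => ?_⟩
      rw [pvGetD_set]
      have hp1 : pvPop 1 = 1 := by
        rw [pvPop_rec 1 le_rfl]; simp [pvPop_zero]
      simp only [List.length_replicate, pvGetD_replicate]
      by_cases hA : k = 1
      · rw [if_pos ⟨hA, by omega⟩, if_pos (by omega), hA, hp1]
      · rw [if_neg (fun h => hA h.1), if_neg (by omega)]
    · -- m ≥ 1 : split off the last index i = m+1
      obtain ⟨hlen, hget⟩ := ih hm (by omega)
      push_cast
      rw [PySem.List.pyRange_one_succ_right (by omega), List.foldl_append]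
      set r := (PySem.List.pyRange 2 ((m:Int)+1) 1).foldl pvStepA
        ((List.replicate (N+1) (0:Int)).set 1 1) with hr
      simp only [List.foldl_cons, List.foldl_nil]
      -- unfold the loop body at i = m+1
      have htn : ((m:Int)+1).toNat = m+1 := by omega
      have htn1 : ((m:Int)+1-1).toNat = m := by omega
      have hmod : PySem.Int.mod ((m:Int)+1) 2 = (((m+1) % 2 : Nat) : Int) := by
        rw [show ((m:Int)+1) = ((m+1:Nat):Int) by push_cast; ring,
          show (2:Int) = ((2:Nat):Int) by norm_num, PySem.Int.mod_natCast]
      have hdiv : (PySem.Int.floordiv ((m:Int)+1) 2).toNat = (m+1)/2 := by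
        rw [show ((m:Int)+1) = ((m+1:Nat):Int) by push_cast; ring,
          show (2:Int) = ((2:Nat):Int) by norm_num, PySem.Int.floordiv_natCast]
        omega
      have hrm : r.getD m 0 = pvPop m := by
        rw [hget m (by omega)]; simp [hm]
      have hrh : r.getD ((m+1)/2) 0 = pvPop ((m+1)/2) := by
        rw [hget ((m+1)/2) (by omega)]
        have hb : 1 ≤ (m+1)/2 ∧ (m+1)/2 ≤ m := by omega
        simp [hb.1, hb.2]
      unfold pvStepA
      simp only [htn, htn1, hmod, hdiv]
      have hlen2 : (r.set (m+1) (r.getD m 0 + 1)).length = N + 1 := by simp [hlen]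
      have hget2 : ∀ k : Nat, k ≤ N → (r.set (m+1) (r.getD m 0 + 1)).getD k 0
          = if k = m+1 then pvPop m + 1 else r.getD k 0 := by
        intro k hk
        rw [pvGetD_set, hlen, hrm]
        split_ifs with hA hB hB
        · rfl
        · omega
        · omega
        · rfl
      by_cases hpar : (m+1) % 2 = 0
      · -- i = m+1 even: dp[i] = min(dp[i], dp[i//2]); m is odd
        have hbeq : ((((m+1) % 2 : Nat) : Int) == (0:Int)) = true := by
          simp [hpar]
        rw [hbeq]
        simp only [if_true]
        have hv1 : (r.set (m+1) (r.getD m 0 + 1)).getD (m+1) 0 = pvPop m + 1 := by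
          rw [hget2 (m+1) (by omega)]; simp
        have hv2 : (r.set (m+1) (r.getD m 0 + 1)).getD ((m+1)/2) 0 = pvPop ((m+1)/2) := by
          rw [hget2 ((m+1)/2) (by omega), hrh]
          have hne : (m+1)/2 ≠ m+1 := by omega
          simp [hne]
        rw [hv1, hv2]
        have hmin : min (pvPop m + 1) (pvPop ((m+1)/2)) = pvPop (m+1) := by
          have hmo : m % 2 = 1 := by omega
          have hh : (m+1)/2 = m/2 + 1 := by omega
          have e1 : pvPop m = pvPop (m/2) + 1 := by
            rw [pvPop_rec m hm, hmo]; norm_num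
          have e2 : pvPop (m+1) = pvPop ((m+1)/2) := by
            rw [pvPop_rec (m+1) (by omega), hpar]; norm_num
          have e3 : pvPop (m/2 + 1) ≤ pvPop (m/2) + 1 := pvPop_succ_le (m/2)
          rw [e2, hh]
          omega
        rw [hmin]
        refine ⟨by simp [hlen], fun k hk => ?_⟩
        rw [pvGetD_set, hlen2, hget2 k hk]
        by_cases hA : k = m+1
        · rw [if_pos ⟨hA, by omega⟩, if_pos (by omega), hA]
        · rw [if_neg (fun h => hA h.1), if_neg hA, hget k hk]
          by_cases hB : 1 ≤ k ∧ k ≤ m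
          · rw [if_pos hB, if_pos (by omega)]
          · rw [if_neg hB, if_neg (by omega)]
      · -- i = m+1 odd: dp[i] = dp[i-1] + 1; m is even
        have hbeq : ((((m+1) % 2 : Nat) : Int) == (0:Int)) = false := by
          have ho : (m+1) % 2 = 1 := by omega
          simp [ho]
        rw [hbeq]
        simp only [Bool.false_eq_true, if_false]
        refine ⟨hlen2, fun k hk => ?_⟩
        rw [hget2 k hk]
        have hval : pvPop m + 1 = pvPop (m+1) := by
          have hme : m % 2 = 0 := by omega
          have hh : (m+1)/2 = m/2 := by omega
          have h1' : (m+1) % 2 = 1 := by omega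
          rw [pvPop_rec m hm, hme, pvPop_rec (m+1) (by omega), hh, h1']
          norm_num
        by_cases hA : k = m+1
        · rw [if_pos hA, if_pos (by omega), hA, hval]
        · rw [if_neg hA, hget k hk]
          by_cases hB : 1 ≤ k ∧ k ≤ m
          · rw [if_pos hB, if_pos (by omega)]
          · rw [if_neg hB, if_neg (by omega)]

theorem solution_dp_spec : Claim_equal_solution_dp := by
  intro n _ hpre
  unfold Spec_solution_dp solution_dp solution_dp_alt
  have hN : n = ((n.toNat : Nat) : Int) := (Int.toNat_of_nonneg (by unfold Pre_solution_dp at hpre; omega)).symm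
  have hN1 : 1 ≤ n.toNat := by unfold Pre_solution_dp at hpre; omega
  rw [hN, pvBase_eq n.toNat]
  obtain ⟨_, hget⟩ := pvLoopA_inv n.toNat n.toNat hN1 le_rfl
  rw [show (((n.toNat:Nat)):Int).toNat = n.toNat by omega, hget n.toNat le_rfl]
  simp [hN1, pvPop]

@[simp] theorem solution_dp_raises : Claim_raises_solution_dp := by
  unfold Claim_raises_solution_dp
  constructor
  · intro n _ hr hp; exact absurd hp (by unfold Pre_solution_dp Raises_solution_dp at *; omega)
  · exact ⟨by decide, by decide, by simp [solution_dp_alt, pvRaiseWitness_solution_dp, pvRaiseWitnessOut_solution_dp, pvLoopB]⟩
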